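-- pv_equiv track=rewrite | github.com/leodenglovescode/CarbonPanel | backend/app/services/site_service.py | _parse_systemctl_show_many
-- ===== SOURCE A (Python) =====
-- def _parse_systemctl_show_many(output: str) -> dict[str, dict[str, str]]:
--     results: dict[str, dict[str, str]] = {}
--     current: dict[str, str] = {}
--
--     for line in output.splitlines():
--         if not line.strip():
--             service_name = current.get("Id")
--             if service_name:
--                 results[service_name] = current
--             current = {}
--             continue
--
--         if line.startswith("Id=") and current:
--             service_name = current.get("Id")
--             if service_name:
--                 results[service_name] = current
--             current = {}
--
--         if "=" not in line:
--             continue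
--
--         key, value = line.split("=", 1)
--         current[key] = value
--
--     service_name = current.get("Id")
--     if service_name:
--         results[service_name] = current
--
--     return results
-- ===== SOURCE B (Python) =====
-- def _parse_systemctl_show_many(output: str) -> dict[str, dict[str, str]]:
--     # Pass 1: segment the lines into blocks (a new block starts at a blank line,
--     # or at an 'Id=' line once the running block already holds a key=value line).
--     blocks = []
--     block = []
--     has_kv = False
--     for line in output.splitlines():
--         if not line.strip():
--             blocks.append(block)
--             block, has_kv = [], False
--             continue
--         if line.startswith("Id=") and has_kv:
--             blocks.append(block)
--             block, has_kv = [], False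
--         block.append(line)
--         has_kv = has_kv or ("=" in line)
--     blocks.append(block)
--
--     # Pass 2: turn each block into a dict and keep it under its Id (if any).
--     results = {}
--     for blk in blocks:
--         props = {}
--         for line in blk:
--             if "=" in line:
--                 key, value = line.split("=", 1)
--                 props[key] = value
--         if props.get("Id"):
--             results[props["Id"]] = props
--     return results
-- ===== Notes on version B (the rewrite author's own statement) =====
-- stated objective: alternative
-- what changed: B replaces A's single stateful scan (accumulating a dict and flushing it at boundaries) with two passes: first segment the lines into blocks at blank lines and mid-stream Id= lines, then build each block's dict and index non-empty-Id blocks.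
import Mathlib
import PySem

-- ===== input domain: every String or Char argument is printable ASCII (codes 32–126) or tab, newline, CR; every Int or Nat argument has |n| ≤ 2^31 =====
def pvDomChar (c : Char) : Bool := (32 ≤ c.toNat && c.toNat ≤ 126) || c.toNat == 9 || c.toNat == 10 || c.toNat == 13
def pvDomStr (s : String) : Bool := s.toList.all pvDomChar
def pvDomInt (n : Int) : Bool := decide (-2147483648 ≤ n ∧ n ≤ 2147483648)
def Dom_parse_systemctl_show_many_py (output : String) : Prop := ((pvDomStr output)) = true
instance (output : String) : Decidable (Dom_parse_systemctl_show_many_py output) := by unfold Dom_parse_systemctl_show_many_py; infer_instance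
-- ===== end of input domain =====

-- B re-decomposes A's one stateful scan into two passes (segment into blocks, then build each
-- block's dict); same results, same asymptotic cost ("alternative", not faster).

-- ===== PORT A =====
-- flush: `service_name = current.get("Id"); if service_name: results[service_name] = current`
def pvFlushA (results : PySem.Dict String (PySem.Dict String String))
    (current : PySem.Dict String String) : PySem.Dict String (PySem.Dict String String) :=
  match current.get? "Id" with
  | some name => if name = "" then results else results.insert name current
  | none => results

-- one iteration of A's `for line in output.splitlines()` loop
def pvStepA (st : PySem.Dict String (PySem.Dict String String) × PySem.Dict String String)
    (line : String) :
    PySem.Dict String (PySem.Dict String String) × PySem.Dict String String :=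
  let results := st.1
  let current := st.2
  if PySem.Str.strip line = "" then
    (pvFlushA results current, PySem.Dict.empty)
  else
    let st' :=
      if PySem.Str.startswith line "Id=" && !current.items.isEmpty then
        (pvFlushA results current, PySem.Dict.empty)
      else (results, current)
    if PySem.Str.isIn "=" line then
      match PySem.Str.splitMax? line "=" 1 with
      | some (key :: value :: _) => (st'.1, st'.2.insert key value)
      | _ => st'                    -- unreachable: split("=",1) with "=" present yields 2 parts
    else st'

def parse_systemctl_show_many_py (output : String) : List (String × List (String × String)) :=
  let st := (PySem.Str.splitlines output).foldl pvStepA (PySem.Dict.empty, PySem.Dict.empty)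
  (pvFlushA st.1 st.2).items.map (fun p => (p.1, p.2.items))

-- ===== PORT B =====
-- pass 1, one iteration: segment into blocks
def pvStep1B (st : List (List String) × List String × Bool) (line : String) :
    List (List String) × List String × Bool :=
  let blocks := st.1
  let block := st.2.1
  let hk := st.2.2
  if PySem.Str.strip line = "" then
    (blocks ++ [block], [], false)
  else
    let st' :=
      if PySem.Str.startswith line "Id=" && hk then (blocks ++ [block], ([] : List String), false)
      else (blocks, block, hk)
    (st'.1, st'.2.1 ++ [line], st'.2.2 || PySem.Str.isIn "=" line)

-- pass 2 helper: build a block's dict from its key=value lines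
def pvBuildB (blk : List String) : PySem.Dict String String :=
  blk.foldl
    (fun props line =>
      if PySem.Str.isIn "=" line then
        match PySem.Str.splitMax? line "=" 1 with
        | some (key :: value :: _) => props.insert key value
        | _ => props
      else props)
    PySem.Dict.empty

-- pass 2, one iteration: keep the block's dict under its Id if that is truthy
def pvKeepB (results : PySem.Dict String (PySem.Dict String String)) (blk : List String) :
    PySem.Dict String (PySem.Dict String String) :=
  let props := pvBuildB blk
  match props.get? "Id" with
  | some name => if name = "" then results else results.insert name props
  | none => results

def parse_systemctl_show_many_py_alt (output : String) : List (String × List (String × String)) :=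
  let st := (PySem.Str.splitlines output).foldl pvStep1B ([], [], false)
  let blocks := st.1 ++ [st.2.1]
  (blocks.foldl pvKeepB PySem.Dict.empty).items.map (fun p => (p.1, p.2.items))

-- ===== PRECONDITION & SPEC =====
def Spec_parse_systemctl_show_many_py (output : String) (out : List (String × List (String × String))) : Prop := out = parse_systemctl_show_many_py_alt output
instance (output : String) (out : List (String × List (String × String))) : Decidable (Spec_parse_systemctl_show_many_py output out) := by unfold Spec_parse_systemctl_show_many_py; infer_instance

-- ===== CLAIM (what is proved, stated in full; the proofs are below) =====
def Claim_equal_parse_systemctl_show_many_py : Prop := ∀ (output : String), Dom_parse_systemctl_show_many_py output → Spec_parse_systemctl_show_many_py output (parse_systemctl_show_many_py output)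

-- ===== LEMMAS AND PROOFS =====

-- split("=", 1) yields exactly two parts whenever "=" occurs in the line
lemma pv_go_m0 (fuel : Nat) (l cur : List Char) (acc : List (List Char)) :
    ∃ X, PySem.Chars.splitOnMax.go ['='] fuel 0 l cur acc = (X :: acc).reverse := by
  match fuel, l with
  | 0, l => exact ⟨cur.reverse ++ l, rfl⟩
  | fuel+1, [] => exact ⟨cur.reverse, rfl⟩
  | fuel+1, c :: rest =>
    refine ⟨cur.reverse ++ (c :: rest), ?_⟩
    simp [PySem.Chars.splitOnMax.go]

lemma pv_go_m1 (fuel : Nat) (l cur : List Char) (acc : List (List Char))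
    (hmem : '=' ∈ l) (hlt : l.length < fuel) :
    ∃ X Y, PySem.Chars.splitOnMax.go ['='] fuel 1 l cur acc = (Y :: X :: acc).reverse := by
  induction fuel generalizing l cur acc with
  | zero => omega
  | succ fuel ih =>
    match l, hmem with
    | c :: rest, hmem =>
      by_cases hc : c = '='
      · subst hc
        have hpre : (['='] : List Char).isPrefixOf ('=' :: rest) = true := by simp [List.isPrefixOf]
        obtain ⟨X, hX⟩ := pv_go_m0 fuel (List.drop 1 ('=' :: rest)) [] (cur.reverse :: acc)
        refine ⟨cur.reverse, X, ?_⟩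
        rw [PySem.Chars.splitOnMax.go]
        simp only [hpre, if_true]
        simpa using hX
      · have hm : '=' ∈ rest := by
          rcases List.mem_cons.mp hmem with h | h
          · exact absurd h.symm hc
          · exact h
        obtain ⟨X, Y, hXY⟩ := ih rest (c :: cur) acc hm (by simpa using Nat.lt_of_succ_lt_succ hlt)
        refine ⟨X, Y, ?_⟩
        rw [PySem.Chars.splitOnMax.go]
        have hpre : (['='] : List Char).isPrefixOf (c :: rest) = false := by
          simp [List.isPrefixOf, Ne.symm hc]
        simp only [hpre, if_neg (by omega : ¬ (1 : Nat) = 0)]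
        exact hXY

lemma pv_splitMax_pair (line : String) (h : PySem.Str.isIn "=" line = true) :
    ∃ k v, PySem.Str.splitMax? line "=" 1 = some [k, v] := by
  have hmem : '=' ∈ line.toList := by
    have hinf : ("=".toList) <:+: line.toList := (PySem.Chars.isIn_iff_infix "=".toList line.toList).mp h
    have : ['='] <:+: line.toList := by simpa using hinf
    exact (List.singleton_sublist).mp this.sublist
  obtain ⟨X, Y, hXY⟩ := pv_go_m1 (line.length + 1) line.toList [] [] hmem (by simp)
  refine ⟨String.ofList X, String.ofList Y, ?_⟩
  have hsep : ("=" : String).toList = ['='] := by decide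
  simp [PySem.Str.splitMax?, PySem.Chars.splitMax?, PySem.Chars.splitOnMax, hsep, hXY]

lemma pv_insert_items_ne_nil {κ ν : Type} [BEq κ] [LawfulBEq κ] (d : PySem.Dict κ ν) (k : κ) (v : ν) :
    (d.insert k v).items ≠ [] := by
  intro hnil
  have h1 : (d.insert k v).get? k = some v := PySem.Dict.get?_insert_self d k v
  have h2 : d.insert k v = PySem.Dict.empty := by
    apply PySem.Dict.ext; simpa using hnil
  rw [h2] at h1
  simp [PySem.Dict.get?_empty] at h1

-- flushing A's current dict built from a block = pass-2 step of B
lemma pv_flush_build (results : PySem.Dict String (PySem.Dict String String)) (blk : List String) :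
    pvFlushA results (pvBuildB blk) = pvKeepB results blk := rfl

-- appending one line to a block updates its dict by A's per-line insert step
lemma pv_buildB_append (block : List String) (line : String) :
    pvBuildB (block ++ [line]) =
      (if PySem.Str.isIn "=" line then
        match PySem.Str.splitMax? line "=" 1 with
        | some (key :: value :: _) => (pvBuildB block).insert key value
        | _ => pvBuildB block
      else pvBuildB block) := by
  simp [pvBuildB, List.foldl_append]

-- main invariant: A's remaining scan from a mid-block state = B's remaining segmentation + pass 2
lemma pv_main (lines : List String) :
    ∀ (blocks : List (List String)) (block : List String) (hk : Bool)
      (results : PySem.Dict String (PySem.Dict String String)),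
      hk = !(pvBuildB block).items.isEmpty →
      (let st := lines.foldl pvStepA (blocks.foldl pvKeepB results, pvBuildB block)
       pvFlushA st.1 st.2)
      = (let st := lines.foldl pvStep1B (blocks, block, hk)
         (st.1 ++ [st.2.1]).foldl pvKeepB results) := by
  induction lines with
  | nil =>
    intro blocks block hk results _
    simp only [List.foldl_nil, List.foldl_append, List.foldl_cons]
    rfl
  | cons line ls ih =>
    intro blocks block hk results hinv
    simp only [List.foldl_cons]
    by_cases h1 : PySem.Str.strip line = ""
    · have hA : pvStepA (blocks.foldl pvKeepB results, pvBuildB block) line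
          = ((blocks ++ [block]).foldl pvKeepB results, pvBuildB []) := by
        simp only [pvStepA, h1, if_true, List.foldl_append, List.foldl_cons, List.foldl_nil]
        exact congrArg (fun r => (r, PySem.Dict.empty)) (pv_flush_build _ block)
      have hB : pvStep1B (blocks, block, hk) line = (blocks ++ [block], [], false) := by
        simp [pvStep1B, h1]
      rw [hA, hB]
      exact ih (blocks ++ [block]) [] false results rfl
    · have h1' : ¬ (PySem.Str.strip line = "") := h1
      by_cases h2 : (PySem.Str.startswith line "Id=" && hk) = true
      · have hcond : (PySem.Str.startswith line "Id=" && !(pvBuildB block).items.isEmpty) = true := by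
          rw [← hinv]; exact h2
        by_cases h3 : PySem.Str.isIn "=" line = true
        · obtain ⟨k, v, hs⟩ := pv_splitMax_pair line h3
          have h3' : PySem.Chars.isIn ['='] line.toList = true := by simpa using h3
          have hbuild : pvBuildB [line] = PySem.Dict.empty.insert k v := by
            simp [pvBuildB, h3', hs]
          have hA : pvStepA (blocks.foldl pvKeepB results, pvBuildB block) line
              = ((blocks ++ [block]).foldl pvKeepB results, pvBuildB [line]) := by
            simp only [pvStepA, if_neg h1', hcond, if_true, h3, hs, List.foldl_append,
              List.foldl_cons, List.foldl_nil, hbuild]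
            exact congrArg (fun r => (r, PySem.Dict.empty.insert k v)) (pv_flush_build _ block)
          have hB : pvStep1B (blocks, block, hk) line = (blocks ++ [block], [line], true) := by
            obtain ⟨h2a, h2b⟩ := Bool.and_eq_true_iff.mp h2
            have h2a' : PySem.Chars.startswith line.toList ['I', 'd', '='] = true := by simpa using h2a
            simp [pvStep1B, h1', h2a', h2b, h3']
          rw [hA, hB]
          refine ih (blocks ++ [block]) [line] true results ?_
          rw [hbuild]
          simp [List.isEmpty_eq_false_iff, pv_insert_items_ne_nil]
        · have h3f : PySem.Str.isIn "=" line = false := by simpa using h3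
          have h3f' : PySem.Chars.isIn ['='] line.toList = false := by simpa using h3f
          have hbuild : pvBuildB [line] = PySem.Dict.empty := by
            simp [pvBuildB, h3f']
          have hA : pvStepA (blocks.foldl pvKeepB results, pvBuildB block) line
              = ((blocks ++ [block]).foldl pvKeepB results, pvBuildB [line]) := by
            simp only [pvStepA, if_neg h1', hcond, if_true, h3f, Bool.false_eq_true, if_false,
              List.foldl_append, List.foldl_cons, List.foldl_nil, hbuild]
            exact congrArg (fun r => (r, PySem.Dict.empty)) (pv_flush_build _ block)
          have hB : pvStep1B (blocks, block, hk) line = (blocks ++ [block], [line], false) := by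
            obtain ⟨h2a, h2b⟩ := Bool.and_eq_true_iff.mp h2
            have h2a' : PySem.Chars.startswith line.toList ['I', 'd', '='] = true := by simpa using h2a
            simp [pvStep1B, h1', h2a', h2b, h3f']
          rw [hA, hB]
          refine ih (blocks ++ [block]) [line] false results ?_
          rw [hbuild]
          rfl
      · have h2f : (PySem.Str.startswith line "Id=" && hk) = false := by simpa using h2
        have hcond : (PySem.Str.startswith line "Id=" && !(pvBuildB block).items.isEmpty) = false := by
          rw [← hinv]; exact h2f
        by_cases h3 : PySem.Str.isIn "=" line = true
        · obtain ⟨k, v, hs⟩ := pv_splitMax_pair line h3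
          have h3' : PySem.Chars.isIn ['='] line.toList = true := by simpa using h3
          have hbuild : pvBuildB (block ++ [line]) = (pvBuildB block).insert k v := by
            rw [pv_buildB_append]; simp [h3', hs]
          have hA : pvStepA (blocks.foldl pvKeepB results, pvBuildB block) line
              = (blocks.foldl pvKeepB results, pvBuildB (block ++ [line])) := by
            simp only [pvStepA, if_neg h1', hcond, Bool.false_eq_true, if_false, h3, if_true,
              hs, hbuild]
          have hB : pvStep1B (blocks, block, hk) line = (blocks, block ++ [line], true) := by
            have h2f' : (PySem.Chars.startswith line.toList ['I', 'd', '='] && hk) = false := by simpa using h2f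
            simp [pvStep1B, h1', h2f', h3']
          rw [hA, hB]
          refine ih blocks (block ++ [line]) true results ?_
          rw [hbuild]
          simp [List.isEmpty_eq_false_iff, pv_insert_items_ne_nil]
        · have h3f : PySem.Str.isIn "=" line = false := by simpa using h3
          have h3fc : PySem.Chars.isIn ['='] line.toList = false := by simpa using h3f
          have hbuild : pvBuildB (block ++ [line]) = pvBuildB block := by
            rw [pv_buildB_append]; simp [h3fc]
          have hA : pvStepA (blocks.foldl pvKeepB results, pvBuildB block) line
              = (blocks.foldl pvKeepB results, pvBuildB (block ++ [line])) := by
            simp only [pvStepA, if_neg h1', hcond, Bool.false_eq_true, if_false, h3f, hbuild]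
          have hB : pvStep1B (blocks, block, hk) line = (blocks, block ++ [line], hk) := by
            have h2f' : (PySem.Chars.startswith line.toList ['I', 'd', '='] && hk) = false := by simpa using h2f
            have h3f' : PySem.Chars.isIn ['='] line.toList = false := by simpa using h3f
            simp [pvStep1B, h1', h2f', h3f']
          rw [hA, hB]
          refine ih blocks (block ++ [line]) hk results ?_
          rw [hbuild]
          exact hinv

-- ===== VERDICT (by name: the statement is the Claim_ definition above) =====
theorem parse_systemctl_show_many_py_spec : Claim_equal_parse_systemctl_show_many_py := by
  intro output _
  unfold Spec_parse_systemctl_show_many_py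
  unfold parse_systemctl_show_many_py parse_systemctl_show_many_py_alt
  have h := pv_main (PySem.Str.splitlines output) [] [] false PySem.Dict.empty (by rfl)
  simp only [pvBuildB, List.foldl_nil] at h
  exact congrArg (fun d : PySem.Dict String (PySem.Dict String String) => d.items.map (fun p => (p.1, p.2.items))) h
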